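-- pv_equiv track=rewrite | github.com/CHW0n9/OpenCode-Token-Meter | App/webview_ui/stats_worker.py | _tab_units
-- ===== SOURCE A (Python) =====
-- TAB_SIZE = 8
--
-- def _tab_units(text, tab_size=TAB_SIZE):
--     units = 0
--     for ch in text:
--         if ch == "\t":
--             units += tab_size - (units % tab_size)
--         else:
--             units += 1
--     return units
-- ===== SOURCE B (Python) =====
-- TAB_SIZE = 8
--
-- def _tab_units(text, tab_size=TAB_SIZE):
--     parts = text.split("\t")
--     units = len(parts[0])
--     for part in parts[1:]:
--         units += tab_size - (units % tab_size)
--         units += len(part)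
--     return units
-- ===== Notes on version B (the rewrite author's own statement) =====
-- stated objective: faster
-- what changed: B splits the text on tabs once and works per segment (add the segment length, then one tab-stop advance per gap), replacing A's per-character Python loop and its per-character tab/non-tab branch.
import Mathlib
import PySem

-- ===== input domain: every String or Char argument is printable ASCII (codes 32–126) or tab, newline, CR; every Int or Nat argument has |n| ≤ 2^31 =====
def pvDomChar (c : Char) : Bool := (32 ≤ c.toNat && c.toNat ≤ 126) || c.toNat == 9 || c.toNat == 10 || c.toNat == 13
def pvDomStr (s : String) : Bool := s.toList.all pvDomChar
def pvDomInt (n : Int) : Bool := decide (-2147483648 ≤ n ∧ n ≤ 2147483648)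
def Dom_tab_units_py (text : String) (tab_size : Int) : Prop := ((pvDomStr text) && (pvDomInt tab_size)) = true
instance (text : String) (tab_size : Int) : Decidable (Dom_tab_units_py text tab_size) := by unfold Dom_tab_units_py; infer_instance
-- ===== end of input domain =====

-- B splits the text on tabs once and advances per segment instead of branching per character (alternative decomposition, same O(n) cost).

-- ===== PORT A =====
def tab_units_py (text : String) (tab_size : Int) : Int :=
  text.toList.foldl (fun units ch =>
    if ch = '\t' then units + (tab_size - PySem.Int.mod units tab_size)
    else units + 1) 0

-- ===== PORT B =====
def tab_units_py_alt (text : String) (tab_size : Int) : Int :=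
  let parts := PySem.Chars.splitOn text.toList ['\t']
  let units : Int := ((PySem.List.pyGetD parts 0 []).length : Int)
  (PySem.List.slice parts (some 1) none).foldl
    (fun units part =>
      (units + (tab_size - PySem.Int.mod units tab_size)) + (part.length : Int)) units

-- ===== PRECONDITION & SPEC =====
-- Pre_ excludes exactly the inputs where Python A raises ZeroDivisionError: tab_size = 0 with a tab in the text.
def Pre_tab_units_py (text : String) (tab_size : Int) : Prop :=
  '\t' ∈ text.toList → tab_size ≠ 0
instance (text : String) (tab_size : Int) : Decidable (Pre_tab_units_py text tab_size) := by unfold Pre_tab_units_py; infer_instance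
def pvWitness_tab_units_py : String × Int := ("ab\tc", 8)

def Spec_tab_units_py (text : String) (tab_size : Int) (out : Int) : Prop := out = tab_units_py_alt text tab_size
instance (text : String) (tab_size : Int) (out : Int) : Decidable (Spec_tab_units_py text tab_size out) := by unfold Spec_tab_units_py; infer_instance

-- ===== CLAIM (what is proved, stated in full; the proofs are below) =====
def Claim_equal_tab_units_py : Prop := ∀ (text : String) (tab_size : Int), Dom_tab_units_py text tab_size → Pre_tab_units_py text tab_size → Spec_tab_units_py text tab_size (tab_units_py text tab_size)

-- ===== LEMMAS AND PROOFS =====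

-- a simple structural model of splitting on '\t'
def pvConsHead (p : List Char) : List (List Char) → List (List Char)
  | [] => [p]
  | x :: xs => (p ++ x) :: xs

def pvTabSplit : List Char → List (List Char)
  | [] => [[]]
  | c :: rest => if c = '\t' then [] :: pvTabSplit rest else pvConsHead [c] (pvTabSplit rest)

theorem pvTabSplit_ne_nil (l : List Char) : pvTabSplit l ≠ [] := by
  cases l with
  | nil => simp [pvTabSplit]
  | cons c rest =>
    simp only [pvTabSplit]
    split
    · simp
    · cases h : pvTabSplit rest <;> simp [pvConsHead]

theorem pvConsHead_consHead (p q : List Char) (ts : List (List Char)) :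
    pvConsHead p (pvConsHead q ts) = pvConsHead (p ++ q) ts := by
  cases ts <;> simp [pvConsHead]

theorem pv_go_eq (l : List Char) : ∀ (fuel : Nat) (cur : List Char) (acc : List (List Char)),
    l.length < fuel →
    PySem.Chars.splitOn.go ['\t'] fuel l cur acc = acc.reverse ++ pvConsHead cur.reverse (pvTabSplit l) := by
  induction l with
  | nil =>
    intro fuel cur acc h
    cases fuel with
    | zero => omega
    | succ f => simp [PySem.Chars.splitOn.go, pvTabSplit, pvConsHead]
  | cons c rest ih =>
    intro fuel cur acc h
    cases fuel with
    | zero => simp at h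
    | succ f =>
      by_cases hc : c = '\t'
      · subst hc
        rw [show PySem.Chars.splitOn.go ['\t'] (f+1) ('\t' :: rest) cur acc
              = PySem.Chars.splitOn.go ['\t'] f rest [] (cur.reverse :: acc) by
            simp [PySem.Chars.splitOn.go, List.isPrefixOf]]
        rw [ih f [] (cur.reverse :: acc) (by simpa using h)]
        have hne := pvTabSplit_ne_nil rest
        cases hts : pvTabSplit rest with
        | nil => exact absurd hts hne
        | cons x xs => simp [pvTabSplit, pvConsHead, hts]
      · rw [show PySem.Chars.splitOn.go ['\t'] (f+1) (c :: rest) cur acc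
              = PySem.Chars.splitOn.go ['\t'] f rest (c :: cur) acc by
            simp [PySem.Chars.splitOn.go, List.isPrefixOf]
            exact fun h => absurd h.symm hc]
        rw [ih f (c :: cur) acc (by simpa using h)]
        simp [pvTabSplit, hc, ← pvConsHead_consHead]

theorem pv_splitOn_eq (l : List Char) : PySem.Chars.splitOn l ['\t'] = pvTabSplit l := by
  rw [show PySem.Chars.splitOn l ['\t'] = PySem.Chars.splitOn.go ['\t'] (l.length + 1) l [] [] from rfl]
  rw [pv_go_eq l (l.length + 1) [] [] (by omega)]
  have hne := pvTabSplit_ne_nil l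
  cases hts : pvTabSplit l with
  | nil => exact absurd hts hne
  | cons x xs => simp [pvConsHead]

-- loop correspondence: A's char fold equals B's segment fold
theorem pv_fold_eq (tab_size : Int) (l : List Char) :
    ∀ (u : Int) (p : List Char) (ps : List (List Char)), pvTabSplit l = p :: ps →
    l.foldl (fun units ch =>
        if ch = '\t' then units + (tab_size - PySem.Int.mod units tab_size)
        else units + 1) u
      = ps.foldl (fun units part =>
          (units + (tab_size - PySem.Int.mod units tab_size)) + (part.length : Int))
          (u + (p.length : Int)) := by
  induction l with
  | nil =>
    intro u p ps hsplit
    simp [pvTabSplit] at hsplit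
    simp [hsplit.1, hsplit.2]
  | cons c rest ih =>
    intro u p ps hsplit
    have hne := pvTabSplit_ne_nil rest
    cases hts : pvTabSplit rest with
    | nil => exact absurd hts hne
    | cons q qs =>
      by_cases hc : c = '\t'
      · subst hc
        simp [pvTabSplit, hts] at hsplit
        obtain ⟨hp, hps⟩ := hsplit
        subst hp; subst hps
        rw [List.foldl_cons, if_pos rfl]
        rw [ih (u + (tab_size - PySem.Int.mod u tab_size)) q qs hts]
        simp
      · simp only [pvTabSplit, if_neg hc, hts, pvConsHead] at hsplit
        obtain ⟨hp, hps⟩ := List.cons.injEq .. ▸ hsplit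
        subst hps
        rw [List.foldl_cons, if_neg hc]
        rw [ih (u + 1) q qs hts, ← hp]
        congr 1
        simp
        ring

-- ===== VERDICT (by name: the statement is the Claim_ definition above) =====
theorem tab_units_py_spec : Claim_equal_tab_units_py := by
  intro text tab_size _ _
  unfold Spec_tab_units_py tab_units_py tab_units_py_alt
  rw [pv_splitOn_eq]
  have hne := pvTabSplit_ne_nil text.toList
  cases hts : pvTabSplit text.toList with
  | nil => exact absurd hts hne
  | cons p ps =>
    rw [pv_fold_eq tab_size text.toList 0 p ps hts]
    simp [PySem.List.pyGetD, PySem.List.pyGet?, PySem.List.pyIdx?, PySem.List.slice_from_one]
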